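-- pv_equiv track=rewrite | github.com/YusunPark/algorithm | ETC/11_05/1.py | solution
-- ===== SOURCE A (Python) =====
-- def solution(line):
--     prev = ''
--     answer = ''
--     flag = False
--     for v in line:
--         if v != prev:
--             if flag:
--                 answer += '*'
--             answer += v
--             prev = v
--             flag = False
--         else:
--             flag = True
--     if flag:
--         answer += '*'
--     return answer
-- ===== SOURCE B (Python) =====
-- def solution(line):
--     out = []
--     i, n = 0, len(line)
--     while i < n:
--         j = i + 1
--         while j < n and line[j] == line[i]:
--             j += 1
--         out.append(line[i])
--         if j - i >= 2:
--             out.append('*')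
--         i = j
--     return ''.join(out)
-- ===== Notes on version B (the rewrite author's own statement) =====
-- stated objective: alternative
-- what changed: B scans the string run by run with a two-pointer inner loop, emitting each run's character plus an asterisk when the run length is at least two, instead of A's per-character state machine carrying a deferred flag and previous character.
import Mathlib
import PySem

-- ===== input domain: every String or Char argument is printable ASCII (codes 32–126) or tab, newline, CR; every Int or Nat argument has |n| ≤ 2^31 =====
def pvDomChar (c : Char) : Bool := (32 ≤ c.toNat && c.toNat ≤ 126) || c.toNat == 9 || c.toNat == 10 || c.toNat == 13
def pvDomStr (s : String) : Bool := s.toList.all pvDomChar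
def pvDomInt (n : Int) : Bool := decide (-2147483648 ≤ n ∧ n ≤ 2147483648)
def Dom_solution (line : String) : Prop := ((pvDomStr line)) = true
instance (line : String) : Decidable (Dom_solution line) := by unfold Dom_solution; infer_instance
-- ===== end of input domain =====

-- B replaces A's deferred-flag per-character state machine by a run-by-run scan
-- (emit the run's character, then '*' when the run length is ≥ 2); same cost, different decomposition.

-- ===== PORT A =====
-- A's for-loop over the characters, state (prev, answer, flag); Python's initial prev = ''
-- (never equal to any character) is Option.none. Strings are handled as their character lists.
def solutionLoop : List Char → Option Char → List Char → Bool → List Char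
  | [], _, answer, flag => if flag then answer ++ ['*'] else answer
  | v :: rest, prev, answer, flag =>
    if some v ≠ prev then
      solutionLoop rest (some v) ((if flag then answer ++ ['*'] else answer) ++ [v]) false
    else
      solutionLoop rest prev answer true

def solution (line : String) : String :=
  String.mk (solutionLoop line.toList none [] false)

-- ===== PORT B =====
-- B's inner while loop (advance j while line[j] == line[i]) is takeWhile/dropWhile on the
-- remaining characters; each run contributes its character and, when j - i ≥ 2, a '*'.
def solutionAltRun : List Char → List Char
  | [] => []
  | c :: rest =>
    (if 2 ≤ 1 + (rest.takeWhile (· == c)).length then [c, '*'] else [c])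
      ++ solutionAltRun (rest.dropWhile (· == c))
  termination_by l => l.length
  decreasing_by
    simpa using Nat.lt_succ_of_le (List.length_dropWhile_le (· == c) rest)

def solution_alt (line : String) : String :=
  String.mk (solutionAltRun line.toList)

-- ===== PRECONDITION & SPEC =====
def Spec_solution (line : String) (out : String) : Prop := out = solution_alt line
instance (line : String) (out : String) : Decidable (Spec_solution line out) := by unfold Spec_solution; infer_instance

-- ===== CLAIM (what is proved, stated in full; the proofs are below) =====
def Claim_equal_solution : Prop := ∀ (line : String), Dom_solution line → Spec_solution line (solution line)

-- ===== LEMMAS AND PROOFS =====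

-- equation lemmas for the well-founded definition of solutionAltRun
theorem solutionAltRun_nil : solutionAltRun [] = [] := by
  rw [solutionAltRun]

theorem solutionAltRun_cons (c : Char) (rest : List Char) :
    solutionAltRun (c :: rest)
      = (if 2 ≤ 1 + (rest.takeWhile (· == c)).length then [c, '*'] else [c])
          ++ solutionAltRun (rest.dropWhile (· == c)) := by
  rw [solutionAltRun]

-- a block of k copies of c is consumed by the else-branch, only setting the flag (when k > 0)
theorem solutionLoop_replicate (k : Nat) (c : Char) (rest : List Char)
    (answer : List Char) (flag : Bool) :
    solutionLoop (List.replicate k c ++ rest) (some c) answer flag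
      = solutionLoop rest (some c) answer (flag || decide (0 < k)) := by
  induction k generalizing flag with
  | zero => simp
  | succ n ih =>
      simp only [List.replicate_succ, List.cons_append, solutionLoop]
      simp [ih]

-- once the next character (if any) differs from prev, a pending flag is just '*' on the answer
theorem solutionLoop_flag (rest : List Char) (c : Char) (answer : List Char)
    (h : rest.head? ≠ some c) :
    solutionLoop rest (some c) answer true
      = solutionLoop rest (some c) (answer ++ ['*']) false := by
  cases rest with
  | nil => simp [solutionLoop]
  | cons w rest' =>
      have hw : w ≠ c := by simpa using h
      simp [solutionLoop, hw]

theorem takeWhile_beq_eq_replicate (c : Char) (l : List Char) :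
    l.takeWhile (· == c) = List.replicate (l.takeWhile (· == c)).length c := by
  apply List.eq_replicate_of_mem
  intro b hb
  have := List.mem_takeWhile_imp hb
  simpa using this

theorem head?_dropWhile_beq (c : Char) (l : List Char) :
    (l.dropWhile (· == c)).head? ≠ some c := by
  induction l with
  | nil => simp
  | cons w l' ih =>
      by_cases hw : w = c
      · simpa [List.dropWhile, hw] using ih
      · have hb : (w == c) = false := by simp [hw]
        simp [List.dropWhile, hb, hw]

theorem solutionLoop_eq_run (l : List Char) (prev : Option Char) (answer : List Char)
    (h : l.head? ≠ prev) :
    solutionLoop l prev answer false = answer ++ solutionAltRun l := by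
  induction hn : l.length using Nat.strong_induction_on generalizing l prev answer with
  | _ n ih =>
    cases l with
    | nil => simp [solutionLoop, solutionAltRun_nil]
    | cons v rest =>
        have hv : some v ≠ prev := by simpa using h
        set k := (rest.takeWhile (· == v)).length with hk
        have hsplit : rest = List.replicate k v ++ rest.dropWhile (· == v) := by
          conv_lhs => rw [← List.takeWhile_append_dropWhile (p := (· == v)) (l := rest)]
          rw [← takeWhile_beq_eq_replicate]
        have hdrop : (rest.dropWhile (· == v)).length ≤ rest.length :=
          List.length_dropWhile_le _ _
        have hlen : (rest.dropWhile (· == v)).length < n := by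
          simp only [← hn, List.length_cons]; omega
        have hhead := head?_dropWhile_beq v rest
        have step : solutionLoop (v :: rest) prev answer false
            = solutionLoop rest (some v) (answer ++ [v]) false := by
          simp [solutionLoop, hv]
        rw [step]
        conv_lhs => rw [hsplit]
        rw [solutionLoop_replicate]
        by_cases hk0 : 0 < k
        · have : (false || decide (0 < k)) = true := by simp [hk0]
          rw [this, solutionLoop_flag _ _ _ hhead,
              ih _ hlen _ (some v) _ hhead rfl]
          rw [solutionAltRun_cons]
          simp [← hk, show 2 ≤ 1 + k by omega]
        · have hk0' : k = 0 := by omega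
          have : (false || decide (0 < k)) = false := by simp [hk0']
          rw [this, ih _ hlen _ (some v) _ hhead rfl]
          rw [solutionAltRun_cons]
          simp [← hk, hk0']

-- ===== VERDICT (by name: the statement is the Claim_ definition above) =====
theorem solution_spec : Claim_equal_solution := by
  intro line _
  unfold Spec_solution solution solution_alt
  cases hl : line.toList with
  | nil => simp [solutionLoop, solutionAltRun_nil]
  | cons v rest =>
      have h : (v :: rest).head? ≠ (none : Option Char) := by simp
      rw [solutionLoop_eq_run _ _ _ h]
      simp
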